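-- pv_equiv track=rewrite | github.com/GitDeus/1_Lab_Python | 1.2. Простейшая арифметика/1.2.11___1_Lab_Python.py | fl2
-- ===== SOURCE A (Python) =====
-- def fl2(lst):
--     f, s, p = 0, 0, 0
--     for i in lst:
--         p+=1
--         if p % 2:
--             s -= int(i)*2
--         else :
--             f += int(i)*3
--     return f - s
-- ===== SOURCE B (Python) =====
-- def fl2(lst):
--     it = iter(lst)
--     total = 0
--     for x in it:
--         total += 2 * int(x)
--         y = next(it, None)
--         if y is not None:
--             total += 3 * int(y)
--     return total
-- ===== Notes on version B (the rewrite author's own statement) =====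
-- stated objective: simpler
-- what changed: Replaces A's parity-counter loop with two running accumulators f and s (combined as f - s at the end) by a single-accumulator loop that consumes the list two elements at a time, adding 2x for the even-index element and 3y for its odd-index partner.
import Mathlib
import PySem

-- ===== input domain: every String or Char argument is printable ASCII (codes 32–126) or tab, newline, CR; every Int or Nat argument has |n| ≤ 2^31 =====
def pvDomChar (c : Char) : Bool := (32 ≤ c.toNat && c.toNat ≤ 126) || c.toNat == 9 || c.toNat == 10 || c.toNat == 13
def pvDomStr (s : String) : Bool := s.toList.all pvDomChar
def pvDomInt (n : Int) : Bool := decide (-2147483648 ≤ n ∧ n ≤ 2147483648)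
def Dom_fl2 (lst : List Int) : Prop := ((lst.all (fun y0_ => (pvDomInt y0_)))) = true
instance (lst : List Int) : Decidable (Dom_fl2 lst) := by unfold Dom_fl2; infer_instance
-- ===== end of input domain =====

-- B replaces A's parity-counter loop (two accumulators f, s combined as f - s) with a
-- single-accumulator loop that consumes the list two elements at a time (objective: simpler).

-- ===== PORT A =====
-- A: f, s, p = 0, 0, 0; for i in lst: p += 1; if p % 2: s -= int(i)*2 else f += int(i)*3; return f - s
def fl2 (lst : List Int) : Int :=
  let r := lst.foldl
    (fun (acc : Int × Int × Int) i =>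
      let p := acc.2.2 + 1
      if PySem.Int.mod p 2 ≠ 0 then (acc.1, acc.2.1 - i * 2, p)
      else (acc.1 + i * 3, acc.2.1, p))
    (0, 0, 0)
  r.1 - r.2.1

-- ===== PORT B =====
-- B's loop: for x in it: total += 2*x; y = next(it, None); if y is not None: total += 3*y
def fl2AltLoop (total : Int) : List Int → Int
  | [] => total
  | [x] => total + 2 * x
  | x :: y :: rest => fl2AltLoop (total + 2 * x + 3 * y) rest

def fl2_alt (lst : List Int) : Int := fl2AltLoop 0 lst

-- ===== PRECONDITION & SPEC =====
def Spec_fl2 (lst : List Int) (out : Int) : Prop := out = fl2_alt lst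
instance (lst : List Int) (out : Int) : Decidable (Spec_fl2 lst out) := by unfold Spec_fl2; infer_instance

-- ===== CLAIM (what is proved, stated in full; the proofs are below) =====
def Claim_equal_fl2 : Prop := ∀ (lst : List Int), Dom_fl2 lst → Spec_fl2 lst (fl2 lst)

-- ===== LEMMAS AND PROOFS =====

-- A's loop step, named for the invariant proof
def fl2Step (acc : Int × Int × Int) (i : Int) : Int × Int × Int :=
  let p := acc.2.2 + 1
  if PySem.Int.mod p 2 ≠ 0 then (acc.1, acc.2.1 - i * 2, p)
  else (acc.1 + i * 3, acc.2.1, p)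

-- Invariant: from an even counter p, A's fold computes B's pairing loop started at f - s.
theorem fl2_invariant : ∀ (total : Int) (lst : List Int) (f s p : Int),
    total = f - s → p % 2 = 0 →
    (lst.foldl fl2Step (f, s, p)).1 - (lst.foldl fl2Step (f, s, p)).2.1
      = fl2AltLoop total lst := by
  intro total lst
  induction total, lst using fl2AltLoop.induct with
  | case1 total => intro f s p ht _; simp [fl2AltLoop, ht]
  | case2 total x =>
      intro f s p ht hp
      have h1 : (p + 1) % 2 = 1 := by omega
      simp [List.foldl, fl2Step, PySem.Int.mod_two_eq, fl2AltLoop, ht]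
      rw [if_pos h1]
      ring
  | case3 total x y rest ih =>
      intro f s p ht hp
      have h1 : PySem.Int.mod (p + 1) 2 ≠ 0 := by
        simp [PySem.Int.mod_two_eq]; omega
      have h2 : ¬ PySem.Int.mod (p + 1 + 1) 2 ≠ 0 := by
        simp [PySem.Int.mod_two_eq]; omega
      have hstep : (x :: y :: rest).foldl fl2Step (f, s, p)
          = rest.foldl fl2Step (f + y * 3, s - x * 2, p + 1 + 1) := by
        simp only [List.foldl, fl2Step, h1, h2, if_pos, if_neg, if_true, ite_not, if_false]
      rw [hstep, ih (f + y * 3) (s - x * 2) (p + 1 + 1) (by rw [ht]; ring) (by omega)]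
      rfl

-- ===== VERDICT (by name: the statement is the Claim_ definition above) =====
theorem fl2_spec : Claim_equal_fl2 := by
  intro lst _
  show fl2 lst = fl2_alt lst
  have h : fl2 lst = (lst.foldl fl2Step (0, 0, 0)).1 - (lst.foldl fl2Step (0, 0, 0)).2.1 := rfl
  rw [h, fl2_invariant 0 lst 0 0 0 rfl rfl]
  rfl
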